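-- pv_equiv track=rewrite | github.com/sagemeadows/cryptogram | cryptosolver.py | compute_fingerprint
-- ===== SOURCE A (Python) =====
-- def compute_fingerprint(word):
--     # Given a 'word': compute a canonical "fingerprint" of the characters within
--     # where each character is assigned a letter of the alphabet representing its
--     # sequence of "first occurrence".
--     #
--     # For example: consider the word 'FALLOW'
--     #
--     # 'F' shows up first and is assigned 'A'
--     # 'A' shows up second and is assigned 'B'
--     # 'L' shows up third and is assigned 'C'
--     # ... and so on D, E, F...
--     #
--     # Its fingerprint would be 'ABCCDE'
--     #
--     # The word 'FELLOW' would have the same fingerprint 'ABCCDE'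
--     # however 'FOLLOW' would be different: 'ABCCBD'
--     #
--     assignments = {}
--     fp = ""
--     char_index = 0
--     for char in word.upper():
--         if (char >= 'A' and char <= 'Z'):
--             if char in assignments:
--                 fp += assignments[char]
--             else:
--                 letter = chr(ord('A') + char_index)
--                 assignments[char] = letter
--                 fp += letter
--                 char_index += 1
--         else:
--             fp += char
--     return fp
-- ===== SOURCE B (Python) =====
-- def compute_fingerprint(word):
--     # Two-pass: collect distinct letters in first-occurrence order, then translate.
--     up = word.upper()
--     seen = []
--     for c in up:
--         if 'A' <= c <= 'Z' and c not in seen: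
--             seen.append(c)
--     return ''.join(chr(ord('A') + seen.index(c)) if 'A' <= c <= 'Z' else c
--                    for c in up)
-- ===== Notes on version B (the rewrite author's own statement) =====
-- stated objective: alternative
-- what changed: Replaces the fused single pass that grows a dict/counter while concatenating onto a string with two separate passes: first collect the distinct letters in first-occurrence order into a list, then translate every character via list position, joining a generator.
import Mathlib
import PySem

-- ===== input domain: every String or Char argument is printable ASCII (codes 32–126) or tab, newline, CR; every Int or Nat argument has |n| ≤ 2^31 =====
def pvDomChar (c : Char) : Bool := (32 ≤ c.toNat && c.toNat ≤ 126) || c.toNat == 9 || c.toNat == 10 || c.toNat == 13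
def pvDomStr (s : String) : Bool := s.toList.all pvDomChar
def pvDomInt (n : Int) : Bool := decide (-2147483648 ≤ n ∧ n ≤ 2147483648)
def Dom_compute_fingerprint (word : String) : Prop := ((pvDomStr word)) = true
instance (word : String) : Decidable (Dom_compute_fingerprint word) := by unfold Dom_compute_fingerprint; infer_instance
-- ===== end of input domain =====

-- B replaces A's fused dict-building pass with two passes (collect distinct letters, then translate by list position); objective: alternative decomposition.


-- ===== PORT A =====
-- A's loop over word.upper(): state = (assignments dict, fp as char list, char_index).
def pvGoA : List Char → PySem.Dict Char Char → List Char → Int → List Char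
  | [], _, fp, _ => fp
  | c :: rest, asg, fp, i =>
    if 'A' ≤ c ∧ c ≤ 'Z' then
      match asg.get? c with            -- 'char in assignments' + lookup
      | some l => pvGoA rest asg (fp ++ [l]) i
      | none =>
        let letter := Char.ofNat (65 + i).toNat   -- chr(ord('A') + char_index)
        pvGoA rest (asg.insert c letter) (fp ++ [letter]) (i + 1)
    else pvGoA rest asg (fp ++ [c]) i

def compute_fingerprint (word : String) : String :=
  String.mk (pvGoA (PySem.Str.upper word).toList PySem.Dict.empty [] 0)

-- ===== PORT B =====
-- first pass: distinct letters in first-occurrence order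
def pvCollect : List Char → List Char → List Char
  | [], seen => seen
  | c :: rest, seen =>
    pvCollect rest (if ('A' ≤ c ∧ c ≤ 'Z') ∧ ¬ seen.contains c then seen ++ [c] else seen)

-- second pass: translate one character; seen.index(c) never fails (every letter of up is in seen), getD 0 totalizes the dead branch
def pvTrans (seen : List Char) (c : Char) : Char :=
  if 'A' ≤ c ∧ c ≤ 'Z' then Char.ofNat (65 + ((PySem.List.index? seen c).getD 0)) else c

def compute_fingerprint_alt (word : String) : String :=
  let up := (PySem.Str.upper word).toList
  let seen := pvCollect up []
  String.mk (up.map (pvTrans seen))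

-- ===== PRECONDITION & SPEC =====
def Spec_compute_fingerprint (word : String) (out : String) : Prop := out = compute_fingerprint_alt word
instance (word : String) (out : String) : Decidable (Spec_compute_fingerprint word out) := by unfold Spec_compute_fingerprint; infer_instance

-- ===== CLAIM (what is proved, stated in full; the proofs are below) =====
def Claim_equal_compute_fingerprint : Prop := ∀ (word : String), Dom_compute_fingerprint word → Spec_compute_fingerprint word (compute_fingerprint word)

-- ===== LEMMAS AND PROOFS =====

-- the collect pass only appends
lemma pvCollect_prefix (rest : List Char) (seen : List Char) : seen <+: pvCollect rest seen := by
  induction rest generalizing seen with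
  | nil => exact List.prefix_rfl
  | cons c rest ih =>
    simp only [pvCollect]
    split
    · exact List.prefix_rfl.trans ((List.prefix_append _ _).trans (ih _))
    · exact ih _

-- index? of a member of a prefix is unchanged in the full list
lemma index?_of_prefix {seen S : List Char} (h : seen <+: S) {c : Char} (hc : c ∈ seen) :
    PySem.List.index? S c = PySem.List.index? seen c := by
  obtain ⟨t, rfl⟩ := h
  exact PySem.List.index?_append_of_mem t hc

-- main invariant: A's loop from a state describing 'seen' equals fp ++ B's translation
lemma pvGoA_eq (rest : List Char) (asg : PySem.Dict Char Char) (fp seen : List Char)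
    (hasg : ∀ c, asg.get? c =
      (PySem.List.index? seen c).map (fun k => Char.ofNat (65 + k))) :
    pvGoA rest asg fp (seen.length : Int)
      = fp ++ rest.map (pvTrans (pvCollect rest seen)) := by
  induction rest generalizing asg fp seen with
  | nil => simp [pvGoA, pvCollect]
  | cons c rest ih =>
    by_cases hL : 'A' ≤ c ∧ c ≤ 'Z'
    · by_cases hmem : c ∈ seen
      · -- already assigned
        have hidx : ∃ k, PySem.List.index? seen c = some k := by
          rcases (PySem.List.index?_isSome_iff seen c).2 hmem with h
          exact Option.isSome_iff_exists.1 h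
        obtain ⟨k, hk⟩ := hidx
        have hget : asg.get? c = some (Char.ofNat (65 + k)) := by
          rw [hasg c, hk]; rfl
        have hcoll : pvCollect (c :: rest) seen = pvCollect rest seen := by
          simp [pvCollect, hmem, hL]
        simp only [pvGoA, if_pos hL, hget]
        rw [ih asg (fp ++ [Char.ofNat (65 + k)]) seen hasg]
        have hS : List.idxOf? c (pvCollect rest seen) = some k := by
          rw [← PySem.List.index?_eq_idxOf?,
            index?_of_prefix (pvCollect_prefix rest seen) hmem, hk]
        simp [hcoll, pvTrans, hL, hS, List.append_assoc]
      · -- new letter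
        have hidxnone : PySem.List.index? seen c = none :=
          (PySem.List.index?_eq_none_iff seen c).2 hmem
        have hget : asg.get? c = none := by rw [hasg c, hidxnone]; rfl
        have hlet : (65 + (seen.length : Int)).toNat = 65 + seen.length := by omega
        have hasg' : ∀ c', (asg.insert c (Char.ofNat (65 + seen.length))).get? c' =
            (PySem.List.index? (seen ++ [c]) c').map (fun k => Char.ofNat (65 + k)) := by
          intro c'
          by_cases hc' : c' = c
          · subst hc'
            rw [PySem.Dict.get?_insert_self,
              PySem.List.index?_append_singleton_self seen c' hmem]
            rfl
          · rw [PySem.Dict.get?_insert_of_ne _ _ hc', hasg c']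
            by_cases hc'mem : c' ∈ seen
            · rw [PySem.List.index?_append_of_mem _ hc'mem]
            · have h1 : PySem.List.index? seen c' = none :=
                (PySem.List.index?_eq_none_iff seen c').2 hc'mem
              have h2 : PySem.List.index? (seen ++ [c]) c' = none := by
                apply (PySem.List.index?_eq_none_iff _ _).2
                simp [hc'mem, hc']
              rw [h1, h2]
        have hcoll : pvCollect (c :: rest) seen = pvCollect rest (seen ++ [c]) := by
          simp [pvCollect, hmem, hL]
        have hlen : (seen.length : Int) + 1 = ((seen ++ [c]).length : Int) := by
          simp
        simp only [pvGoA, if_pos hL, hget, hlet, hlen]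
        rw [ih _ _ (seen ++ [c]) hasg']
        have hmemS' : c ∈ seen ++ [c] := by simp
        have hS : List.idxOf? c (pvCollect rest (seen ++ [c])) = some seen.length := by
          rw [← PySem.List.index?_eq_idxOf?,
            index?_of_prefix (pvCollect_prefix rest (seen ++ [c])) hmemS',
            PySem.List.index?_append_singleton_self seen c hmem]
        simp [hcoll, pvTrans, hL, hS, List.append_assoc]
    · -- non-letter passthrough
      have hcoll : pvCollect (c :: rest) seen = pvCollect rest seen := by
        simp only [pvCollect]
        simp [hL]
      simp only [pvGoA, if_neg hL]
      rw [ih asg (fp ++ [c]) seen hasg]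
      simp [hcoll, pvTrans, hL, List.append_assoc]

-- ===== VERDICT (by name: the statement is the Claim_ definition above) =====
theorem compute_fingerprint_spec : Claim_equal_compute_fingerprint := by
  intro word _
  unfold Spec_compute_fingerprint compute_fingerprint compute_fingerprint_alt
  have h := pvGoA_eq (PySem.Str.upper word).toList PySem.Dict.empty [] []
    (by intro c; simp [PySem.Dict.get?_empty, PySem.List.index?])
  simpa using congrArg String.mk h
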